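-- pv_equiv track=rewrite | github.com/Harshith-19/Student-Registration-Portal | Cardgame/cardgame.py | cardchoice1
-- ===== SOURCE A (Python) =====
-- def cardchoice1(a,bot):
--     flag=0
--     for i in bot:
--         if(a[1]==i[1] and i[0]>a[0]):
--
--            b=i
--            flag=1
--            break
--
--         elif(a[1]==i[1]):
--             for i in range(len(bot)-1,-1,-1):
--                 if(a[1]==bot[i][1]):
--                    b=bot[i]
--                    flag=1
--                    break
--             if(flag==1):
--                 break
--     if(flag!=1):
--         b=bot[-1]
--     return b
-- ===== SOURCE B (Python) =====
-- def cardchoice1(a, bot):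
--     matches = [c for c in bot if c[1] == a[1]]
--     if not matches:
--         return bot[-1]
--     first = matches[0]
--     return first if first[0] > a[0] else matches[-1]
-- ===== Notes on version B (the rewrite author's own statement) =====
-- stated objective: simpler
-- what changed: Replaces A's nested forward/backward break-loops with flag state by one filter pass collecting the same-suit cards and a flat branch: no matches -> bot[-1], else the first match if it beats a, else the last match.
import Mathlib
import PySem

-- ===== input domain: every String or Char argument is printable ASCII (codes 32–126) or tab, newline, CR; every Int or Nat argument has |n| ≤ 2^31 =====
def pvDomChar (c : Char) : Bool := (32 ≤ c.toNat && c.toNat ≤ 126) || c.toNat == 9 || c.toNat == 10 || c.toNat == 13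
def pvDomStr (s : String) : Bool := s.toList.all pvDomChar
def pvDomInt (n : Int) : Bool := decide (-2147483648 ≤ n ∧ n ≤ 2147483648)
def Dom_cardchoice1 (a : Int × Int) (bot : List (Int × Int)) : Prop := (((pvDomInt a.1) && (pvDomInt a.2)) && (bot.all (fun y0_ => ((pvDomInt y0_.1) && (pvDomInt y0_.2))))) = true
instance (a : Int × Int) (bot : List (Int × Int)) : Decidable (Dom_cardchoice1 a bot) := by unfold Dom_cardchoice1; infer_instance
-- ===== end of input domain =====

-- B replaces A's nested forward/backward break-loops with one filter pass and a flat branch (objective: simpler).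

-- ===== PORT A =====
-- inner 'for i in range(len(bot)-1,-1,-1): if a[1]==bot[i][1]: b=bot[i]; break' — walk the index list
def cardInner (a : Int × Int) (bot : List (Int × Int)) : List Int → Option (Int × Int)
  | [] => none
  | j :: rest =>
    match PySem.List.pyGet? bot j with
    | none => cardInner a bot rest   -- unreachable: range indices are in range
    | some c => if a.2 == c.2 then some c else cardInner a bot rest

-- outer 'for i in bot' with flag/b: some b = loop broke with flag=1, none = fell through
def cardLoop (a : Int × Int) (bot : List (Int × Int)) : List (Int × Int) → Option (Int × Int)
  | [] => none
  | i :: rest =>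
    if a.2 == i.2 && i.1 > a.1 then some i
    else if a.2 == i.2 then
      match cardInner a bot (PySem.List.pyRange ((bot.length : Int) - 1) (-1) (-1)) with
      | some b => some b
      | none => cardLoop a bot rest
    else cardLoop a bot rest

def cardchoice1 (a : Int × Int) (bot : List (Int × Int)) : Int × Int :=
  match cardLoop a bot bot with
  | some b => b
  | none => (PySem.List.pyGet? bot (-1)).getD (0, 0)   -- bot[-1]; none (IndexError) excluded by Pre_

-- ===== PORT B =====
def cardchoice1_alt (a : Int × Int) (bot : List (Int × Int)) : Int × Int :=
  let ms := bot.filter (fun c => c.2 == a.2)           -- 'matches' in Source B (reserved word in Lean)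
  match ms with
  | [] => (PySem.List.pyGet? bot (-1)).getD (0, 0)     -- bot[-1]; none (IndexError) excluded by Pre_
  | first :: _ =>
    if first.1 > a.1 then first
    else (PySem.List.pyGet? ms (-1)).getD (0, 0)       -- matches[-1]

-- ===== PRECONDITION & SPEC =====
-- Pre_ excludes only the empty hand, on which Python A raises IndexError at bot[-1].
def Pre_cardchoice1 (a : Int × Int) (bot : List (Int × Int)) : Prop := bot ≠ []
instance (a : Int × Int) (bot : List (Int × Int)) : Decidable (Pre_cardchoice1 a bot) := by unfold Pre_cardchoice1; infer_instance
def pvWitness_cardchoice1 : (Int × Int) × (List (Int × Int)) := ((3, 1), [(2, 0), (5, 1), (4, 1)])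

def Spec_cardchoice1 (a : Int × Int) (bot : List (Int × Int)) (out : Int × Int) : Prop := out = cardchoice1_alt a bot
instance (a : Int × Int) (bot : List (Int × Int)) (out : Int × Int) : Decidable (Spec_cardchoice1 a bot out) := by unfold Spec_cardchoice1; infer_instance

-- ===== CLAIM (what is proved, stated in full; the proofs are below) =====
def Claim_equal_cardchoice1 : Prop := ∀ (a : Int × Int) (bot : List (Int × Int)), Dom_cardchoice1 a bot → Pre_cardchoice1 a bot → Spec_cardchoice1 a bot (cardchoice1 a bot)

-- ===== LEMMAS AND PROOFS =====

-- the inner backward scan over xs's full index range finds the LAST same-suit card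
theorem cardInner_append (a : Int × Int) (xs : List (Int × Int)) (x : Int × Int)
    (idx : List Int) (h : ∀ j ∈ idx, 0 ≤ j ∧ j < (xs.length : Int)) :
    cardInner a (xs ++ [x]) idx = cardInner a xs idx := by
  induction idx with
  | nil => rfl
  | cons j rest ih =>
    have hj := h j (by simp)
    have hrest : ∀ j ∈ rest, 0 ≤ j ∧ j < (xs.length : Int) := fun j hm => h j (by simp [hm])
    have hget : PySem.List.pyGet? (xs ++ [x]) j = PySem.List.pyGet? xs j := by
      rw [PySem.List.pyGet?_of_nonneg (xs ++ [x]) hj.1, PySem.List.pyGet?_of_nonneg xs hj.1]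
      rw [List.getElem?_append_left (by omega : j.toNat < xs.length)]
    simp only [cardInner, hget]
    cases PySem.List.pyGet? xs j with
    | none => exact ih hrest
    | some c => by_cases hc : a.2 == c.2 <;> simp [hc, ih hrest]

theorem cardInner_eq_find (a : Int × Int) (bot : List (Int × Int)) :
    cardInner a bot (PySem.List.pyRange ((bot.length : Int) - 1) (-1) (-1))
      = bot.reverse.find? (fun c => a.2 == c.2) := by
  induction bot using List.reverseRecOn with
  | nil => simp [PySem.List.pyRange_neg_one_eq_nil, cardInner]
  | append_singleton xs x ih =>
    have hlen : ((xs ++ [x]).length : Int) - 1 = (xs.length : Int) := by simp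
    rw [hlen, PySem.List.pyRange_neg_one_cons (by omega : (-1 : Int) < (xs.length : Int))]
    simp only [cardInner, PySem.List.pyGet?_append_length]
    cases hx : (a.2 == x.2) with
    | true => simp [hx]
    | false =>
      simp only [hx, Bool.false_eq_true, if_false]
      rw [cardInner_append a xs x _
        (fun j hj => by
          have := (PySem.List.mem_pyRange_neg_one).mp hj
          omega)]
      simp [ih, List.find?, hx]

-- the outer loop, characterised by the FIRST same-suit card
theorem cardLoop_char (a : Int × Int) (bot : List (Int × Int)) (rest : List (Int × Int))
    (hsub : ∀ c ∈ rest, c ∈ bot) :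
    cardLoop a bot rest =
      match rest.find? (fun c => a.2 == c.2) with
      | none => none
      | some c => if c.1 > a.1 then some c
                  else bot.reverse.find? (fun c => a.2 == c.2) := by
  induction rest with
  | nil => rfl
  | cons i rest ih =>
    have hi : i ∈ bot := hsub i (by simp)
    have hrest : ∀ c ∈ rest, c ∈ bot := fun c hc => hsub c (by simp [hc])
    by_cases hsuit : a.2 == i.2
    · by_cases hbeat : i.1 > a.1
      · simp [cardLoop, hsuit, hbeat, List.find?]
      · have hfind : bot.reverse.find? (fun c => a.2 == c.2) ≠ none := by
          intro hnone
          have := List.find?_eq_none.mp hnone i (by simp [hi])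
          simp [hsuit] at this
        simp only [cardLoop, List.find?, hsuit, hbeat]
        rw [cardInner_eq_find]
        cases hcase : bot.reverse.find? (fun c => a.2 == c.2) with
        | none => exact absurd hcase hfind
        | some b => simp
    · simp only [cardLoop, List.find?, hsuit]
      simpa [hsuit] using ih hrest

theorem find?_eq_head?_filter' (p : Int × Int → Bool) (l : List (Int × Int)) :
    l.find? p = (l.filter p).head? := by
  induction l with
  | nil => rfl
  | cons x t ih =>
    cases hx : p x
    · simpa [hx] using ih
    · simp [hx]

theorem filter_comm_beq (a : Int × Int) (bot : List (Int × Int)) :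
    bot.filter (fun c => c.2 == a.2) = bot.filter (fun c => a.2 == c.2) := by
  apply List.filter_congr
  intro c _
  simp [eq_comm]

-- ===== VERDICT (by name: the statement is the Claim_ definition above) =====
theorem cardchoice1_spec : Claim_equal_cardchoice1 := by
  intro a bot _ hpre
  unfold Spec_cardchoice1 cardchoice1 cardchoice1_alt
  rw [cardLoop_char a bot bot (fun c hc => hc), filter_comm_beq]
  have hfind : bot.find? (fun c => a.2 == c.2) = (bot.filter (fun c => a.2 == c.2)).head? :=
    find?_eq_head?_filter' _ _
  have hrev : bot.reverse.find? (fun c => a.2 == c.2)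
      = (bot.filter (fun c => a.2 == c.2)).getLast? := by
    rw [find?_eq_head?_filter']
    simp [List.filter_reverse, List.head?_reverse]
  cases hm : bot.filter (fun c => a.2 == c.2) with
  | nil => simp [hfind, hm]
  | cons first t =>
    have hne : first :: t ≠ ([] : List (Int × Int)) := by simp
    by_cases hbeat : first.1 > a.1
    · simp [hfind, hm, hbeat]
    · simp only [hfind, hm, List.head?, hrev, if_neg hbeat]
      cases hlast : (first :: t).getLast? with
      | none => simp at hlast
      | some b => simp [hlast, PySem.List.pyGet?_neg_one]
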